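-- pv_equiv track=rewrite | github.com/Amirsorouri00/CafeQueraInterview | 2.py | calculate
-- ===== SOURCE A (Python) =====
-- val = 999999
--
-- def iskabise(i):
--     if True == (i % 400 == 0 or i%4 == 0 and i%100!=0):
--         return True
--     return False
--
-- def calculate(input):
--     temp = input
--     mod = temp%7
--     mod2 = mod
--
--     for i in range(temp+1, val):
--         if True == iskabise(i):
--             # kabise
--             mod2 = (mod2 + 2)%7
--         else:
--             mod2 = (mod2 + 1)%7
--         if mod2 == mod and iskabise(i) == iskabise(input):
--             return i
-- ===== SOURCE B (Python) =====
-- val = 999999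
--
-- def iskabise(i):
--     return i % 400 == 0 or (i % 4 == 0 and i % 100 != 0)
--
-- def leaps(n):
--     return n // 4 - n // 100 + n // 400
--
-- def calculate(input):
--     base = leaps(input)
--     same = iskabise(input)
--     for i in range(input + 1, val):
--         if (i - input + leaps(i) - base) % 7 == 0 and iskabise(i) == same:
--             return i
-- ===== Notes on version B (the rewrite author's own statement) =====
-- stated objective: alternative
-- what changed: Replaces the incremental weekday accumulator carried across years with a per-candidate closed-form leap-year counter (quarters minus centuries plus quadricentennials), testing divisibility by seven of the total day offset directly at each candidate year.
import Mathlib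
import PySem

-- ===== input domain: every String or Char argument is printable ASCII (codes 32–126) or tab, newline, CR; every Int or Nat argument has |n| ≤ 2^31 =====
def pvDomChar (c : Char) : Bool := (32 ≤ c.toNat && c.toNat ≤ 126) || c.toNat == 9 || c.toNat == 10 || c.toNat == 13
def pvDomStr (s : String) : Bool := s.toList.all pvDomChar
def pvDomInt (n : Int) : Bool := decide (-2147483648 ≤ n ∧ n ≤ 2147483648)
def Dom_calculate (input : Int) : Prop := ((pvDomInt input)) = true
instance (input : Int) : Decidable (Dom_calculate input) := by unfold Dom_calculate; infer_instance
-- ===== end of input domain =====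

-- B replaces A's incremental weekday accumulator by a per-candidate closed-form
-- leap-year counter (n//4 - n//100 + n//400); same outer search, different state: alternative decomposition.

-- ===== PORT A =====
def iskabiseA (i : Int) : Bool :=
  if ((PySem.Int.mod i 400 == 0 || (PySem.Int.mod i 4 == 0 && PySem.Int.mod i 100 != 0)) == true)
  then true else false

def calcLoopA (input mod : Int) : Int → Int → Nat → Option Int
  | _, _, 0 => none
  | mod2, i, n+1 =>
    let mod2' := if iskabiseA i = true then PySem.Int.mod (mod2 + 2) 7
                 else PySem.Int.mod (mod2 + 1) 7
    if mod2' == mod && (iskabiseA i == iskabiseA input) then some i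
    else calcLoopA input mod mod2' (i + 1) n

def calculate (input : Int) : Option Int :=
  let temp := input
  let mod := PySem.Int.mod temp 7
  calcLoopA input mod mod (temp + 1) (999999 - (temp + 1)).toNat

-- ===== PORT B =====
def iskabiseB (i : Int) : Bool :=
  PySem.Int.mod i 400 == 0 || (PySem.Int.mod i 4 == 0 && PySem.Int.mod i 100 != 0)

def leapsB (n : Int) : Int :=
  PySem.Int.floordiv n 4 - PySem.Int.floordiv n 100 + PySem.Int.floordiv n 400

def calcLoopB (input base : Int) (same : Bool) : Int → Nat → Option Int
  | _, 0 => none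
  | i, n+1 =>
    if PySem.Int.mod (i - input + leapsB i - base) 7 == 0 && (iskabiseB i == same) then some i
    else calcLoopB input base same (i + 1) n

def calculate_alt (input : Int) : Option Int :=
  let base := leapsB input
  let same := iskabiseB input
  calcLoopB input base same (input + 1) (999999 - (input + 1)).toNat

-- ===== PRECONDITION & SPEC =====
def Spec_calculate (input : Int) (out : Option Int) : Prop := out = calculate_alt input
instance (input : Int) (out : Option Int) : Decidable (Spec_calculate input out) := by unfold Spec_calculate; infer_instance

-- ===== CLAIM (what is proved, stated in full; the proofs are below) =====
def Claim_equal_calculate : Prop := ∀ (input : Int), Dom_calculate input → Spec_calculate input (calculate input)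

-- ===== LEMMAS AND PROOFS =====

lemma iskabise_eq (i : Int) : iskabiseA i = iskabiseB i := by
  unfold iskabiseA iskabiseB; split <;> simp_all

lemma fd4 (a : Int) : PySem.Int.floordiv a 4 = a / 4 :=
  PySem.Int.floordiv_eq_ediv_of_pos (by norm_num)
lemma fd100 (a : Int) : PySem.Int.floordiv a 100 = a / 100 :=
  PySem.Int.floordiv_eq_ediv_of_pos (by norm_num)
lemma fd400 (a : Int) : PySem.Int.floordiv a 400 = a / 400 :=
  PySem.Int.floordiv_eq_ediv_of_pos (by norm_num)
lemma md4 (a : Int) : PySem.Int.mod a 4 = a % 4 :=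
  PySem.Int.mod_eq_emod_of_pos (by norm_num)
lemma md100 (a : Int) : PySem.Int.mod a 100 = a % 100 :=
  PySem.Int.mod_eq_emod_of_pos (by norm_num)
lemma md400 (a : Int) : PySem.Int.mod a 400 = a % 400 :=
  PySem.Int.mod_eq_emod_of_pos (by norm_num)
lemma md7 (a : Int) : PySem.Int.mod a 7 = a % 7 :=
  PySem.Int.mod_eq_emod_of_pos (by norm_num)

lemma leap_step (i : Int) : leapsB i - leapsB (i - 1) = if iskabiseB i = true then 1 else 0 := by
  simp only [leapsB, iskabiseB, fd4, fd100, fd400, md4, md100, md400]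
  split_ifs with h <;>
    simp only [Bool.or_eq_true, Bool.and_eq_true, beq_iff_eq, bne_iff_ne, ne_eq, not_or,
      not_and, not_not] at h <;> omega

lemma loop_eq (inp : Int) (n : Nat) : ∀ (i mod2 : Int),
    mod2 = (inp % 7 + (i - 1 - inp) + (leapsB (i - 1) - leapsB inp)) % 7 →
    calcLoopA inp (PySem.Int.mod inp 7) mod2 i n
      = calcLoopB inp (leapsB inp) (iskabiseB inp) i n := by
  induction n with
  | zero => intro i mod2 _; rfl
  | succ n ih =>
    intro i mod2 hm
    have hstep := leap_step i
    have hnext : (if iskabiseB i = true then PySem.Int.mod (mod2 + 2) 7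
                  else PySem.Int.mod (mod2 + 1) 7)
        = (inp % 7 + (i - inp) + (leapsB i - leapsB inp)) % 7 := by
      cases hk : iskabiseB i <;>
        simp only [hk, md7, Bool.false_eq_true, if_true, if_false] at hstep ⊢ <;> omega
    have hcond : ((if iskabiseB i = true then PySem.Int.mod (mod2 + 2) 7
                   else PySem.Int.mod (mod2 + 1) 7) == PySem.Int.mod inp 7)
        = (PySem.Int.mod (i - inp + leapsB i - leapsB inp) 7 == 0) := by
      rw [hnext, md7, md7]
      by_cases h : (i - inp + leapsB i - leapsB inp) % 7 = 0
      · have h2 : (inp % 7 + (i - inp) + (leapsB i - leapsB inp)) % 7 = inp % 7 := by omega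
        simp [h2, h]
      · have h2 : (inp % 7 + (i - inp) + (leapsB i - leapsB inp)) % 7 ≠ inp % 7 := by omega
        simp [h2, h]
    simp only [calcLoopA, calcLoopB]
    rw [iskabise_eq i, iskabise_eq inp, hcond]
    split
    · rfl
    · exact ih (i + 1) _ (by rw [show i + 1 - 1 = i from by ring]; exact hnext)

-- ===== VERDICT (by name: the statement is the Claim_ definition above) =====
theorem calculate_spec : Claim_equal_calculate := by
  intro input _
  unfold Spec_calculate calculate calculate_alt
  refine loop_eq input _ (input + 1) _ ?_
  rw [show input + 1 - 1 = input from by ring, md7]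
  omega
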